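-- pv_equiv track=rewrite | github.com/GS-Bacon/idle_factory | scripts/generate-wiki.py | parse_doc_comment
-- ===== SOURCE A (Python) =====
-- from typing import Optional
--
-- def parse_doc_comment(lines: list[str], start_idx: int) -> tuple[str, str, dict[str, str]]:
--     """
--     Parse a Rust doc comment starting at start_idx.
--     Returns (description_en, description_ja, sections) where sections is a dict of section_name -> content
--
--     Format:
--         /// English description
--         ///
--         /// # ja
--         /// Japanese description
--         ///
--         /// # Response
--         /// JSON example
--         ///
--         /// # ja Response
--         /// Japanese JSON example
--     """
--     description_en_lines = []
--     description_ja_lines = []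
--     sections: dict[str, str] = {}
--     current_section: Optional[str] = None
--     section_lines: list[str] = []
--     in_ja_description = False
--
--     idx = start_idx
--     while idx < len(lines):
--         line = lines[idx]
--         stripped = line.strip()
--
--         # Check if this is a doc comment line
--         if stripped.startswith("///"):
--             content = stripped[3:].strip() if len(stripped) > 3 else ""
--
--             # Check for section header
--             if content.startswith("# "):
--                 # Save previous section
--                 if current_section:
--                     sections[current_section] = "\n".join(section_lines).strip()
--
--                 section_name = content[2:].strip()
--
--                 # Check if this is the `# ja` marker for Japanese description
--                 if section_name == "ja":
--                     in_ja_description = True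
--                     current_section = None
--                     section_lines = []
--                 else:
--                     in_ja_description = False
--                     current_section = section_name
--                     section_lines = []
--             elif current_section:
--                 section_lines.append(content)
--             elif in_ja_description:
--                 description_ja_lines.append(content)
--             else:
--                 description_en_lines.append(content)
--
--             idx += 1
--         elif stripped.startswith("//!"):
--             # Module-level doc, skip
--             idx += 1
--         elif stripped == "" or stripped.startswith("//"):
--             idx += 1
--         else:
--             break
--
--     # Save last section
--     if current_section:
--         sections[current_section] = "\n".join(section_lines).strip()
--
--     description_en = "\n".join(description_en_lines).strip()
--     description_ja = "\n".join(description_ja_lines).strip()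
--     return description_en, description_ja, sections
-- ===== SOURCE B (Python) =====
-- def parse_doc_comment(lines: list[str], start_idx: int) -> tuple[str, str, dict[str, str]]:
--     # Pass 1: collect the content of each consecutive `///` doc line.
--     contents = []
--     idx = start_idx
--     while idx < len(lines):
--         stripped = lines[idx].strip()
--         if stripped.startswith("///"):
--             contents.append(stripped[3:].strip() if len(stripped) > 3 else "")
--         elif not (stripped == "" or stripped.startswith("//")):
--             break
--         idx += 1
--
--     # Pass 2: cut the content list into blocks at `# ` headers.
--     groups = []          # (header or None, list of body lines); header None only for the lead block
--     header, buf = None, []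
--     for c in contents:
--         if c.startswith("# "):
--             groups.append((header, buf))
--             header, buf = c[2:].strip(), []
--         else:
--             buf.append(c)
--     groups.append((header, buf))
--
--     # Pass 3: distribute the blocks.
--     en, ja, sections = [], [], {}
--     for h, body in groups:
--         if h is None:
--             en += body
--         elif h == "ja":
--             ja += body
--         else:
--             sections[h] = "\n".join(body).strip()
--     return "\n".join(en).strip(), "\n".join(ja).strip(), sections
-- ===== Notes on version B (the rewrite author's own statement) =====
-- stated objective: alternative
-- what changed: A classifies each line inside one interleaved scan carrying six pieces of state (en/ja lists, dict, current section, section buffer, ja flag); B is a three-phase pipeline: collect the doc-comment contents, cut that list into header-delimited blocks, then distribute each block to en/ja/sections.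
import Mathlib
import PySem

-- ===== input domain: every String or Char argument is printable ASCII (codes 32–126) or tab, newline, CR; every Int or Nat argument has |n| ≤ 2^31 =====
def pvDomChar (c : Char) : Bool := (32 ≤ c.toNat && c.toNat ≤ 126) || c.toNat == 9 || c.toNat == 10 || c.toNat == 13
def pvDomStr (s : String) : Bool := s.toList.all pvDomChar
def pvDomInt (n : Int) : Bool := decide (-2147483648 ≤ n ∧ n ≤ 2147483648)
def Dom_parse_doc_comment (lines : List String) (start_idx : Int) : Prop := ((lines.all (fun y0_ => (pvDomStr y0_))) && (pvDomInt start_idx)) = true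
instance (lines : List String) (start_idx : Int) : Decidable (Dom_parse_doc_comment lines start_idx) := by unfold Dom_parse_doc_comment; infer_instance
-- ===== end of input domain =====

-- B restructures A's single interleaved scan into a three-phase pipeline (collect doc contents,
-- cut into header blocks, distribute blocks); same cost, proved equal on Pre_ (start_idx ≥ -len(lines)).

-- ===== PORT A =====
-- A's loop state: description_en_lines, description_ja_lines, sections, current_section, section_lines, in_ja_description
structure pvSt where
  en   : List String
  ja   : List String
  secs : PySem.Dict String String
  cur  : Option String
  secl : List String
  inja : Bool
  deriving Repr

-- Python truthiness of Optional[str]: truthy iff not None and not ""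
def pvTruthy (o : Option String) : Bool :=
  match o with
  | none => false
  | some s => s ≠ ""

-- `if current_section: sections[current_section] = "\n".join(section_lines).strip()` (appears twice in A)
def pvAflush (secs : PySem.Dict String String) (cur : Option String) (secl : List String) :
    PySem.Dict String String :=
  match cur with
  | none => secs
  | some s => if s = "" then secs else secs.insert s (PySem.Str.strip (PySem.Str.join "\n" secl))

-- the body of A's `///` branch, given the extracted `content`
def pvAstep (st : pvSt) (content : String) : pvSt :=
  if PySem.Str.startswith content "# " then
    let secs' := pvAflush st.secs st.cur st.secl
    let section_name := PySem.Str.strip (PySem.Str.slice content (some 2) none)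
    if section_name = "ja" then ⟨st.en, st.ja, secs', none, [], true⟩
    else ⟨st.en, st.ja, secs', some section_name, [], false⟩
  else if pvTruthy st.cur then { st with secl := st.secl ++ [content] }
  else if st.inja then { st with ja := st.ja ++ [content] }
  else { st with en := st.en ++ [content] }

-- the tail of A after the loop
def pvAfinish (st : pvSt) : String × String × (List (String × String)) :=
  (PySem.Str.strip (PySem.Str.join "\n" st.en),
   PySem.Str.strip (PySem.Str.join "\n" st.ja),
   (pvAflush st.secs st.cur st.secl).items)

-- A's while loop
def pvAloop (lines : List String) (st : pvSt) (idx : Int) :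
    String × String × (List (String × String)) :=
  if _h : idx < (lines.length : Int) then
    match PySem.List.pyGet? lines idx with
    | none => ("", "", [])   -- IndexError (idx < -len(lines)); excluded by Pre_
    | some line =>
      let stripped := PySem.Str.strip line
      if PySem.Str.startswith stripped "///" then
        pvAloop lines
          (pvAstep st (if 3 < PySem.Str.len stripped
                       then PySem.Str.strip (PySem.Str.slice stripped (some 3) none) else ""))
          (idx + 1)
      else if PySem.Str.startswith stripped "//!" then pvAloop lines st (idx + 1)
      else if stripped = "" || PySem.Str.startswith stripped "//" then pvAloop lines st (idx + 1)
      else pvAfinish st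
  else pvAfinish st
termination_by ((lines.length : Int) - idx).toNat
decreasing_by all_goals (simp at *; omega)

def parse_doc_comment (lines : List String) (start_idx : Int) :
    String × String × (List (String × String)) :=
  pvAloop lines ⟨[], [], PySem.Dict.empty, none, [], false⟩ start_idx

-- ===== PORT B =====
-- pass 1: the content of each consecutive `///` doc line
def pvBcollect (lines : List String) (idx : Int) : List String :=
  if _h : idx < (lines.length : Int) then
    match PySem.List.pyGet? lines idx with
    | none => []   -- IndexError in Python B as well (idx < -len(lines)); excluded by Pre_
    | some line =>
      let stripped := PySem.Str.strip line
      if PySem.Str.startswith stripped "///" then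
        (if 3 < PySem.Str.len stripped
         then PySem.Str.strip (PySem.Str.slice stripped (some 3) none) else "")
          :: pvBcollect lines (idx + 1)
      else if !(stripped = "" || PySem.Str.startswith stripped "//") then []
      else pvBcollect lines (idx + 1)
  else []
termination_by ((lines.length : Int) - idx).toNat
decreasing_by all_goals (simp at *; omega)

-- pass 2: cut the content list into (header, body) blocks at `# ` headers
def pvBgroupStep (g : List (Option String × List String) × Option String × List String)
    (c : String) : List (Option String × List String) × Option String × List String :=
  if PySem.Str.startswith c "# " then
    (g.1 ++ [(g.2.1, g.2.2)],
     some (PySem.Str.strip (PySem.Str.slice c (some 2) none)), [])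
  else (g.1, g.2.1, g.2.2 ++ [c])

-- pass 3: distribute one block
def pvBdistStep (d : List String × List String × PySem.Dict String String)
    (blk : Option String × List String) :
    List String × List String × PySem.Dict String String :=
  match blk.1 with
  | none => (d.1 ++ blk.2, d.2.1, d.2.2)
  | some h =>
    if h = "ja" then (d.1, d.2.1 ++ blk.2, d.2.2)
    else (d.1, d.2.1, d.2.2.insert h (PySem.Str.strip (PySem.Str.join "\n" blk.2)))

def parse_doc_comment_alt (lines : List String) (start_idx : Int) :
    String × String × (List (String × String)) :=
  let contents := pvBcollect lines start_idx
  let g := contents.foldl pvBgroupStep ([], none, [])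
  let groups := g.1 ++ [(g.2.1, g.2.2)]
  let d := groups.foldl pvBdistStep ([], [], PySem.Dict.empty)
  (PySem.Str.strip (PySem.Str.join "\n" d.1),
   PySem.Str.strip (PySem.Str.join "\n" d.2.1),
   d.2.2.items)

-- ===== PRECONDITION & SPEC =====
-- Pre_ is exactly where Python A returns: for start_idx < -len(lines) the first access
-- lines[start_idx] raises IndexError (negative indices down to -len wrap and are handled).
def Pre_parse_doc_comment (lines : List String) (start_idx : Int) : Prop :=
  -(lines.length : Int) ≤ start_idx
instance (lines : List String) (start_idx : Int) : Decidable (Pre_parse_doc_comment lines start_idx) := by unfold Pre_parse_doc_comment; infer_instance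

def pvWitness_parse_doc_comment : List String × Int :=
  (["/// Hello", "///", "/// # ja", "/// Konnichiwa", "/// # Response", "/// {}"], 0)

def Spec_parse_doc_comment (lines : List String) (start_idx : Int) (out : String × String × (List (String × String))) : Prop := out = parse_doc_comment_alt lines start_idx
instance (lines : List String) (start_idx : Int) (out : String × String × (List (String × String))) : Decidable (Spec_parse_doc_comment lines start_idx out) := by unfold Spec_parse_doc_comment; infer_instance

-- ===== CLAIM (what is proved, stated in full; the proofs are below) =====
def Claim_equal_parse_doc_comment : Prop := ∀ (lines : List String) (start_idx : Int), Dom_parse_doc_comment lines start_idx → Pre_parse_doc_comment lines start_idx → Spec_parse_doc_comment lines start_idx (parse_doc_comment lines start_idx)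

-- ===== LEMMAS AND PROOFS =====

-- headers produced by a stripped `# `-line are never empty (so A's truthiness test is a None test)
def pvPc (c : String) : Prop :=
  PySem.Str.startswith c "# " = true → PySem.Str.strip (PySem.Str.slice c (some 2) none) ≠ ""

def pvHok (h? : Option String) : Prop := ∀ h, h? = some h → h ≠ ""

-- simulation map: a pass-2 intermediate state corresponds to this A-loop state
def pvPhi (g : List (Option String × List String) × Option String × List String) : pvSt :=
  let d := g.1.foldl pvBdistStep ([], [], PySem.Dict.empty)
  match g.2.1 with
  | none => ⟨d.1 ++ g.2.2, d.2.1, d.2.2, none, [], false⟩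
  | some h =>
    if h = "ja" then ⟨d.1, d.2.1 ++ g.2.2, d.2.2, none, [], true⟩
    else ⟨d.1, d.2.1, d.2.2, some h, g.2.2, false⟩

lemma pv_strip_drop2_ne_nil (u : List Char)
    (h : ['#', ' '] <+: PySem.Chars.strip u) :
    PySem.Chars.strip ((PySem.Chars.strip u).drop 2) ≠ [] := by
  obtain ⟨rest, hl⟩ := h
  intro hnil
  have hdrop : (PySem.Chars.strip u).drop 2 = rest := by
    rw [← hl]; rfl
  rw [hdrop] at hnil
  have hall : ∀ x ∈ rest, PySem.Chars.isspace x = true := by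
    have h2 : List.dropWhile PySem.Chars.isspace
        (List.dropWhile PySem.Chars.isspace rest).reverse = [] := by
      have h1 : (List.dropWhile PySem.Chars.isspace
          (List.dropWhile PySem.Chars.isspace rest).reverse).reverse = [] := hnil
      simpa using congrArg List.reverse h1
    have h3 := List.dropWhile_eq_nil_iff.mp h2
    intro x hx
    rcases List.mem_append.mp (by
      rw [List.takeWhile_append_dropWhile (p := PySem.Chars.isspace) (l := rest)]; exact hx) with h4 | h4
    · exact List.mem_takeWhile_imp h4
    · exact h3 x (List.mem_reverse.mpr h4)
  have hr : List.dropWhile PySem.Chars.isspace (PySem.Chars.strip u).reverse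
      = (PySem.Chars.strip u).reverse := by
    simp [PySem.Chars.strip, PySem.Chars.rstrip, List.dropWhile_idempotent]
  rw [← hl] at hr
  have hrev : ((['#', ' '] ++ rest).reverse) = (rest.reverse ++ [' ']) ++ ['#'] := by simp
  have hfirst : List.dropWhile PySem.Chars.isspace (rest.reverse ++ [' ']) = [] := by
    rw [List.dropWhile_eq_nil_iff]
    intro x hx
    rcases List.mem_append.mp hx with h4 | h4
    · exact hall x (List.mem_reverse.mp h4)
    · simp at h4; subst h4; decide
  rw [hrev, List.dropWhile_append, hfirst] at hr
  simp only [List.isEmpty_nil, if_true] at hr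
  have h5 : List.dropWhile PySem.Chars.isspace ['#'] = ['#'] := by decide
  rw [h5] at hr
  have hlen := congrArg List.length hr
  simp at hlen

lemma pv_pc_of_strip (u : String) : pvPc (PySem.Str.strip u) := by
  intro hsw heq
  have hsw' : ("# ").toList <+: PySem.Chars.strip u.toList := by
    rw [PySem.Str.startswith_eq, PySem.Chars.startswith_iff, PySem.Str.toList_strip] at hsw
    exact hsw
  have hpre : ['#', ' '] <+: PySem.Chars.strip u.toList := hsw'
  have h2 := pv_strip_drop2_ne_nil u.toList hpre
  apply h2
  have h3 := congrArg String.toList heq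
  rw [PySem.Str.toList_strip, PySem.Str.toList_slice, PySem.Chars.slice_eq_listSlice,
    PySem.List.slice_from _ (by norm_num), PySem.Str.toList_strip] at h3
  simpa using h3

lemma pv_sw_slash3_imp (s : String) (h : PySem.Str.startswith s "//!" = true) :
    PySem.Str.startswith s "//" = true := by
  rw [PySem.Str.startswith_eq, PySem.Chars.startswith_iff] at h ⊢
  exact List.IsPrefix.trans (by decide) h

lemma pv_collect_pc (lines : List String) (idx : Int) :
    ∀ c ∈ pvBcollect lines idx, pvPc c := by
  fun_induction pvBcollect lines idx with
  | case1 idx h hget => simp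
  | case2 idx h line hget stripped hsw ih =>
    intro c hc
    rcases List.mem_cons.mp hc with hc | hc
    · subst hc
      by_cases hlen : 3 < PySem.Str.len stripped
      · rw [if_pos hlen]; exact pv_pc_of_strip _
      · rw [if_neg hlen]; intro hsw2; exact absurd hsw2 (by decide)
    · exact ih c hc
  | case3 idx h line hget stripped hsw hbrk => simp
  | case4 idx h line hget stripped hsw hbrk ih => exact ih
  | case5 idx h => simp

lemma pv_phi_step (g : List (Option String × List String) × Option String × List String)
    (c : String) (hok : pvHok g.2.1) :
    pvPhi (pvBgroupStep g c) = pvAstep (pvPhi g) c := by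
  rcases g with ⟨groups, hdr, buf⟩
  by_cases hsw : PySem.Str.startswith c "# " = true
  · have hsw' : PySem.Chars.startswith c.toList ['#', ' '] = true := by simpa using hsw
    rcases hdr with _ | h
    · by_cases hja : PySem.Str.strip (PySem.Str.slice c (some 2) none) = "ja" <;>
        simp [pvPhi, pvBgroupStep, pvAstep, pvAflush, pvTruthy, hsw', hja,
          List.foldl_append, pvBdistStep]
    · have hne : h ≠ "" := hok h rfl
      by_cases hhja : h = "ja" <;>
        by_cases hja : PySem.Str.strip (PySem.Str.slice c (some 2) none) = "ja" <;>
          simp [pvPhi, pvBgroupStep, pvAstep, pvAflush, pvTruthy, hsw', hja, hhja, hne,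
            List.foldl_append, pvBdistStep]
  · have hsw' : PySem.Chars.startswith c.toList ['#', ' '] = false := by
      simpa using (Bool.not_eq_true _).mp (by simpa using hsw)
    rcases hdr with _ | h
    · simp [pvPhi, pvBgroupStep, pvAstep, pvAflush, pvTruthy, hsw']
    · have hne : h ≠ "" := hok h rfl
      by_cases hhja : h = "ja" <;>
        simp [pvPhi, pvBgroupStep, pvAstep, pvAflush, pvTruthy, hsw', hhja, hne]

lemma pv_hok_step (g : List (Option String × List String) × Option String × List String)
    (c : String) (hok : pvHok g.2.1) (hc : pvPc c) :
    pvHok (pvBgroupStep g c).2.1 := by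
  rcases g with ⟨groups, hdr, buf⟩
  by_cases hsw : PySem.Str.startswith c "# " = true
  · have hsw' : PySem.Chars.startswith c.toList ['#', ' '] = true := by simpa using hsw
    intro h hh
    simp [pvBgroupStep, hsw'] at hh
    rw [← hh]
    exact hc hsw
  · have hsw' : PySem.Chars.startswith c.toList ['#', ' '] = false := by
      simpa using (Bool.not_eq_true _).mp (by simpa using hsw)
    intro h hh
    simp [pvBgroupStep, hsw'] at hh
    exact hok h (by simp [hh])

lemma pv_phi_foldl (cs : List String) :
    ∀ g, pvHok g.2.1 → (∀ c ∈ cs, pvPc c) →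
      cs.foldl pvAstep (pvPhi g) = pvPhi (cs.foldl pvBgroupStep g) ∧
      pvHok (cs.foldl pvBgroupStep g).2.1 := by
  induction cs with
  | nil => intro g hok _; exact ⟨rfl, hok⟩
  | cons c cs ih =>
    intro g hok hpc
    have hc := hpc c (List.mem_cons_self)
    have hok' := pv_hok_step g c hok hc
    have hstep := pv_phi_step g c hok
    have := ih (pvBgroupStep g c) hok' (fun x hx => hpc x (List.mem_cons_of_mem _ hx))
    simpa [List.foldl_cons, hstep] using this

-- A's finish on a simulated state is B's pass-3 on the flushed block list
lemma pv_phi_finish (g : List (Option String × List String) × Option String × List String)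
    (hok : pvHok g.2.1) :
    pvAfinish (pvPhi g) =
      (let d := (g.1 ++ [(g.2.1, g.2.2)]).foldl pvBdistStep ([], [], PySem.Dict.empty)
       (PySem.Str.strip (PySem.Str.join "\n" d.1),
        PySem.Str.strip (PySem.Str.join "\n" d.2.1),
        d.2.2.items)) := by
  rcases g with ⟨groups, hdr, buf⟩
  rcases hdr with _ | h
  · simp [pvPhi, pvAfinish, pvAflush, List.foldl_append, pvBdistStep]
  · have hne : h ≠ "" := hok h rfl
    by_cases hhja : h = "ja" <;>
      simp [pvPhi, pvAfinish, pvAflush, hhja, hne, List.foldl_append, pvBdistStep]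

-- A's scan equals "finish after folding A's content step over B's collected contents"
lemma pv_scan (lines : List String) (st : pvSt) (idx : Int)
    (hge : -(lines.length : Int) ≤ idx) :
    pvAloop lines st idx = pvAfinish ((pvBcollect lines idx).foldl pvAstep st) := by
  revert hge
  fun_induction pvAloop lines st idx with
  | case1 st idx h hget =>
    intro hge
    exfalso
    rw [PySem.List.pyGet?_eq_none_iff] at hget
    apply hget
    simp [PySem.Raise.InRange]
    omega
  | case2 st idx h line hget stripped hsw ih =>
    intro hge
    simp only [stripped] at hsw ih ⊢
    have hB : pvBcollect lines idx =
        (if 3 < PySem.Str.len (PySem.Str.strip line)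
         then PySem.Str.strip (PySem.Str.slice (PySem.Str.strip line) (some 3) none) else "")
          :: pvBcollect lines (idx + 1) := by
      rw [pvBcollect]
      simp only [dif_pos h, hget]
      rw [if_pos hsw]
    rw [hB, List.foldl_cons]
    exact ih (by omega)
  | case3 st idx h line hget stripped hsw hsw2 ih =>
    intro hge
    simp only [stripped] at hsw hsw2 ih ⊢
    have hslash := pv_sw_slash3_imp _ hsw2
    have hB : pvBcollect lines idx = pvBcollect lines (idx + 1) := by
      rw [pvBcollect]
      simp only [dif_pos h, hget]
      rw [if_neg hsw]
      have hslash' : PySem.Chars.startswith (PySem.Chars.strip line.toList) ['/', '/'] = true := by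
        simpa using hslash
      have hcondf : (!(decide (PySem.Str.strip line = "")
          || PySem.Str.startswith (PySem.Str.strip line) "//")) = false := by
        simp [hslash']
      rw [hcondf]
      simp
    rw [hB]
    exact ih (by omega)
  | case4 st idx h line hget stripped hsw hsw2 hcond ih =>
    intro hge
    simp only [stripped] at hsw hsw2 hcond ih ⊢
    have hB : pvBcollect lines idx = pvBcollect lines (idx + 1) := by
      rw [pvBcollect]
      simp only [dif_pos h, hget]
      rw [if_neg hsw]
      have hcondf : (!(decide (PySem.Str.strip line = "")
          || PySem.Str.startswith (PySem.Str.strip line) "//")) = false := by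
        simp only [hcond, Bool.not_true]
      rw [hcondf]
      simp
    rw [hB]
    exact ih (by omega)
  | case5 st idx h line hget stripped hsw hsw2 hcond =>
    intro hge
    simp only [stripped] at hsw hsw2 hcond ⊢
    have hB : pvBcollect lines idx = [] := by
      rw [pvBcollect]
      simp only [dif_pos h, hget]
      rw [if_neg hsw]
      have hcondt : (!(decide (PySem.Str.strip line = "")
          || PySem.Str.startswith (PySem.Str.strip line) "//")) = true := by
        simpa using hcond
      rw [hcondt]
      simp
    rw [hB]
    rfl
  | case6 st idx h =>
    intro hge
    have hB : pvBcollect lines idx = [] := by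
      rw [pvBcollect]
      rw [dif_neg h]
    rw [hB]
    rfl

theorem pv_main (lines : List String) (start_idx : Int)
    (hpre : Pre_parse_doc_comment lines start_idx) :
    parse_doc_comment lines start_idx = parse_doc_comment_alt lines start_idx := by
  unfold Pre_parse_doc_comment at hpre
  unfold parse_doc_comment parse_doc_comment_alt
  rw [pv_scan lines _ start_idx hpre]
  have h0 : (⟨[], [], PySem.Dict.empty, none, [], false⟩ : pvSt) = pvPhi ([], none, []) := rfl
  rw [h0]
  obtain ⟨hfold, hok⟩ := pv_phi_foldl (pvBcollect lines start_idx) ([], none, [])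
    (by intro h hh; cases hh) (pv_collect_pc lines start_idx)
  rw [hfold, pv_phi_finish _ hok]

-- ===== VERDICT (by name: the statement is the Claim_ definition above) =====
theorem parse_doc_comment_spec : Claim_equal_parse_doc_comment := by
  intro lines start_idx _hdom hpre
  exact pv_main lines start_idx hpre
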